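-- pv_equiv track=rewrite | github.com/Hall-No-7/ps-study | cjeongmin/2022-kakao/2022-kakao-receive-report.py | solution
-- ===== SOURCE A (Python) =====
-- def solution(id_list, report, k):
--     answer = dict.fromkeys(id_list, 0)
--     count = dict.fromkeys(id_list, 0)
--     compression_report = set(report)
--     for user1, user2 in map(lambda x: x.split(), compression_report):
--         count[user2] += 1
--     for user1, user2 in map(lambda x: x.split(), compression_report):
--         if (count[user2] >= k):
--             answer[user1] += 1
--     return [answer[user] for user in answer]
-- ===== SOURCE B (Python) =====
-- def solution(id_list, report, k):
--     # Dict-free brute force: dedupe lines, then for each distinct id u count the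
--     # report pairs (a, b) with a == u whose target b occurs at least k times,
--     # rescanning the pair list for each target instead of keeping counters.
--     pairs = [line.split() for line in set(report)]
--     seconds = [b for _, b in pairs]
--     return [sum(1 for a, b in pairs if a == u and seconds.count(b) >= k)
--             for u in dict.fromkeys(id_list)]
-- ===== Notes on version B (the rewrite author's own statement) =====
-- stated objective: alternative
-- what changed: B drops both dicts and both of A's passes: it splits the deduplicated lines once into pairs and answers each distinct id by a nested scan that counts the pairs (a, b) with a == u whose target b occurs at least k times (rescanning the target list with .count), instead of A's dict-counter pass followed by a dict-crediting pass; Pre_ excludes exactly the inputs where A raises (a report line without exactly two tokens, a reported user outside id_list, or a reporter outside id_list whose target has at least k distinct reports).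
import Mathlib
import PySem

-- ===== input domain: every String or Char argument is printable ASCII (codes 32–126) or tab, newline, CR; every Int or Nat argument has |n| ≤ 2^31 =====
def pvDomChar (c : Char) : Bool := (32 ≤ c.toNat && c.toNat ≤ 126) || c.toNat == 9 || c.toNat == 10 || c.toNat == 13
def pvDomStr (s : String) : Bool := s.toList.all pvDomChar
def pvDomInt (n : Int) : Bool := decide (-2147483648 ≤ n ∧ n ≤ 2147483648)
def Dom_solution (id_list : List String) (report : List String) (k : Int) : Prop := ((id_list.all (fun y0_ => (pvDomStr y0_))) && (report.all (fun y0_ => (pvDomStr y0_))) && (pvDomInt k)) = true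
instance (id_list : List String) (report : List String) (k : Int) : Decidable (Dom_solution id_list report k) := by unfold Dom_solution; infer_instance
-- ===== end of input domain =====

-- B replaces A's two dict-counting passes by a dict-free nested scan: split the
-- deduplicated lines once into pairs and count, for each distinct id, the pairs
-- (a, b) with a == u whose target occurs at least k times ("alternative").


-- shared tokenisation helpers: user1 = line.split()[0], user2 = line.split()[1]
-- (exact under Pre_, which demands exactly two tokens per line)
def pvT0 (s : String) : String := (PySem.Str.split₀ s).getD 0 ""
def pvT1 (s : String) : String := (PySem.Str.split₀ s).getD 1 ""
-- number of DISTINCT report lines whose reported user is b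
def pvCnt (report : List String) (b : String) : Nat :=
  (PySem.Set.ofList report : List String).countP (fun s => pvT1 s == b)

-- ===== PORT A =====
-- Both dicts are keyed by id_list; `count[user2] += 1` / `answer[user1] += 1` are
-- ported with Dict.modify, exact under Pre_ (the key is present there; on a missing
-- key Python raises KeyError, which Pre_ excludes; likewise the two-token unpacking).
-- The set of reports is only consumed order-insensitively (counting), so folding it is exact.
def solution (id_list : List String) (report : List String) (k : Int) : List Int :=
  let answer0 := id_list.foldl (fun d u => d.insert u (0 : Int)) PySem.Dict.empty
  let count0 := id_list.foldl (fun d u => d.insert u (0 : Int)) PySem.Dict.empty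
  let comp : PySem.Set String := PySem.Set.ofList report
  let count := ((comp : List String).map (fun s => pvT1 s)).foldl
      (fun d u2 => d.modify u2 0 (· + 1)) count0
  let answer := (comp : List String).foldl
      (fun d s => if k ≤ count.getD (pvT1 s) 0 then d.modify (pvT0 s) 0 (· + 1) else d) answer0
  answer.keys.map (fun u => answer.getD u 0)

-- ===== PORT B =====
-- `pairs` keeps the once-split lines; the tuple unpackings `for _, b` / `for a, b`
-- are ported with getD 0/1, exact under Pre_ (exactly two tokens per line there);
-- `sum(1 for …)` is countP, `seconds.count` is List.count, and iterating
-- `dict.fromkeys(id_list)` is iterating the distinct ids in order.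
def solution_alt (id_list : List String) (report : List String) (k : Int) : List Int :=
  let pairs := (PySem.Set.ofList report : List String).map (fun line => PySem.Str.split₀ line)
  let seconds := pairs.map (fun p => p.getD 1 "")
  (PySem.Set.ofList id_list : List String).map
    (fun u => ((pairs.countP
        (fun p => p.getD 0 "" == u && decide (k ≤ (seconds.count (p.getD 1 "") : Int)))) : Int))

-- ===== PRECONDITION & SPEC =====
-- Pre_ holds exactly where A returns: every report line has exactly two tokens, its
-- reported user is in id_list, and its reporter is in id_list whenever the reported
-- user has at least k distinct reports (otherwise A raises ValueError / KeyError).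
def Pre_solution (id_list : List String) (report : List String) (k : Int) : Prop :=
  ∀ s ∈ report, (PySem.Str.split₀ s).length = 2 ∧ pvT1 s ∈ id_list ∧
    (k ≤ (pvCnt report (pvT1 s) : Int) → pvT0 s ∈ id_list)
instance (id_list : List String) (report : List String) (k : Int) : Decidable (Pre_solution id_list report k) := by unfold Pre_solution; infer_instance

def pvWitness_solution : List String × List String × Int :=
  (["muzi", "frodo", "apeach"], ["muzi frodo", "apeach frodo", "muzi frodo"], 2)

def Spec_solution (id_list : List String) (report : List String) (k : Int) (out : List Int) : Prop := out = solution_alt id_list report k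
instance (id_list : List String) (report : List String) (k : Int) (out : List Int) : Decidable (Spec_solution id_list report k out) := by unfold Spec_solution; infer_instance

-- ===== CLAIM (what is proved, stated in full; the proofs are below) =====
def Claim_equal_solution : Prop := ∀ (id_list : List String) (report : List String) (k : Int), Dom_solution id_list report k → Pre_solution id_list report k → Spec_solution id_list report k (solution id_list report k)
-- ===== LEMMAS AND PROOFS =====

-- the deduplicated report, as a plain list
def pvD (report : List String) : List String := (PySem.Set.ofList report : List String)

-- fromkeys initialisation: looking up the constant value always yields it
theorem pv_getD_init {κ ν : Type} [BEq κ] [LawfulBEq κ] [DecidableEq κ] (c : ν) (l : List κ)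
    (d : PySem.Dict κ ν) (x : κ) (h : d.getD x c = c) :
    (l.foldl (fun d u => d.insert u c) d).getD x c = c := by
  induction l generalizing d with
  | nil => exact h
  | cons a t ih =>
      simp only [List.foldl_cons]
      exact ih _ (by rw [PySem.Dict.getD_insert]; split <;> simp [h])

-- fromkeys initialisation: the keys are the distinct ids, in order
theorem pv_fromkeys_keys {κ ν : Type} [BEq κ] [LawfulBEq κ] (c : ν) (l : List κ)
    (d : PySem.Dict κ ν) :
    (l.foldl (fun d u => d.insert u c) d).keys = PySem.Set.update d.keys l :=
  PySem.Dict.keys_foldl_insert l (fun _ _ => c) d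

-- the counting loop of A, in the shape keys_foldl_modify expects
theorem pv_countfold_keys (l : List String) (d : PySem.Dict String Int) :
    (l.foldl (fun d x => d.modify x 0 (· + 1)) d).keys = PySem.Set.update d.keys l :=
  PySem.Dict.keys_foldl_modify l 0 (fun _ _ => (· + 1)) d

-- a guarded fold is the fold of the filtered-and-mapped list
theorem pv_foldl_if {α β δ : Type} (c : α → Prop) [DecidablePred c] (f : α → β) (F : δ → β → δ)
    (l : List α) (init : δ) :
    l.foldl (fun d s => if c s then F d (f s) else d) init
      = ((l.filter (fun s => decide (c s))).map f).foldl F init := by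
  induction l generalizing init with
  | nil => rfl
  | cons a t ih => by_cases h : c a <;> simp [h, ih]

-- A's guarded crediting loop, specialised so that `rw` matches the port verbatim
theorem pv_ansA (k : Int) (cnt : PySem.Dict String Int) (l : List String)
    (d : PySem.Dict String Int) :
    l.foldl (fun d s => if k ≤ cnt.getD (pvT1 s) 0 then d.modify (pvT0 s) 0 (· + 1) else d) d
      = ((l.filter (fun s => decide (k ≤ cnt.getD (pvT1 s) 0))).map pvT0).foldl
          (fun d x => d.modify x 0 (· + 1)) d :=
  pv_foldl_if (fun s => k ≤ cnt.getD (pvT1 s) 0) pvT0 (fun d x => d.modify x 0 (· + 1)) l d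

-- updating a set with elements it already contains does nothing
theorem pv_update_self {α : Type} [BEq α] [LawfulBEq α] (s : PySem.Set α) (l : List α)
    (h : ∀ x ∈ l, x ∈ s) : PySem.Set.update s l = s := by
  induction l generalizing s with
  | nil => rfl
  | cons a t ih =>
      have ha : PySem.Set.add s a = s := by
        simp [PySem.Set.add, PySem.Set.contains, h a (by simp)]
      show PySem.Set.update (PySem.Set.add s a) t = s
      rw [ha]; exact ih s (fun x hx => h x (by simp [hx]))

theorem pv_count_map (l : List String) (f : String → String) (u : String) :
    (l.map f).count u = l.countP (fun s => f s == u) := by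
  rw [List.count_eq_countP, List.countP_map]; rfl

-- ===== VERDICT (by name: the statement is the Claim_ definition above) =====
theorem solution_spec : Claim_equal_solution := by
  intro ids report k _hd hpre
  show solution ids report k = solution_alt ids report k
  have hpre' : ∀ s ∈ pvD report,
      pvT1 s ∈ ids ∧ (k ≤ (pvCnt report (pvT1 s) : Int) → pvT0 s ∈ ids) := by
    intro s hs
    have := hpre s ((PySem.Set.mem_ofList report s).1 hs)
    exact ⟨this.2.1, this.2.2⟩
  have hinit0 : ∀ x : String,
      (ids.foldl (fun d u => d.insert u (0 : Int)) PySem.Dict.empty).getD x 0 = 0 :=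
    fun x => pv_getD_init _ _ _ _ (PySem.Dict.getD_empty x 0)
  have hkeys0 : (ids.foldl (fun d u => d.insert u (0 : Int)) PySem.Dict.empty).keys
      = (PySem.Set.ofList ids : List String) := by
    rw [pv_fromkeys_keys, PySem.Dict.keys_empty, PySem.Set.update_nil_left]
  -- ===== A's side: canonical form =====
  have hA : solution ids report k
      = (PySem.Set.ofList ids : List String).map
          (fun u => (((((pvD report).filter
              (fun s => decide (k ≤ (pvCnt report (pvT1 s) : Int)))).map pvT0).count u : Nat) : Int)) := by
    simp only [solution]
    rw [pv_ansA]
    have hcnt : ∀ b : String,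
        (((PySem.Set.ofList report : List String).map (fun s => pvT1 s)).foldl
            (fun d u2 => d.modify u2 0 (· + 1))
            (ids.foldl (fun d u => d.insert u (0 : Int)) PySem.Dict.empty)).getD b 0
          = (pvCnt report b : Int) := by
      intro b
      rw [PySem.Dict.getD_foldl_modify_add_one,
        pv_getD_init (0 : Int) ids PySem.Dict.empty b (PySem.Dict.getD_empty b 0), zero_add]
      norm_cast
      rw [pv_count_map]
      rfl
    simp only [hcnt]
    have hmemA : ∀ x ∈ ((PySem.Set.ofList report : List String).filter
        (fun s => decide (k ≤ (pvCnt report (pvT1 s) : Int)))).map pvT0,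
        x ∈ (PySem.Set.ofList ids : List String) := by
      intro x hx
      rcases List.mem_map.1 hx with ⟨s, hs, rfl⟩
      rcases List.mem_filter.1 hs with ⟨hsD, hc⟩
      exact (PySem.Set.mem_ofList ids _).2 ((hpre' s hsD).2 (of_decide_eq_true hc))
    rw [pv_countfold_keys, hkeys0, pv_update_self _ _ hmemA]
    refine List.map_congr_left (fun u _ => ?_)
    rw [PySem.Dict.getD_foldl_modify_add_one, hinit0, zero_add]
    rfl
  -- ===== B is already in that form, term by term =====
  rw [hA]
  simp only [solution_alt]
  refine List.map_congr_left (fun u _ => ?_)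
  congr 1
  rw [pv_count_map, List.countP_filter, List.countP_map]
  refine List.countP_congr (fun s _ => ?_)
  have hcount : List.count ((PySem.Str.split₀ s).getD 1 "")
      (List.map (fun p => p.getD 1 "")
        (List.map (fun line => PySem.Str.split₀ line) (PySem.Set.ofList report : List String)))
      = pvCnt report (pvT1 s) := by
    rw [List.map_map, pv_count_map]
    rfl
  simp only [Function.comp_apply]
  rw [hcount]
  exact Iff.of_eq (congrArg (· = true) rfl)
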